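-- pv_equiv track=rewrite | github.com/AfricasVoices/CoreDataModules | core_data_modules/cleaners/digit_cleaner.py | replace_digit_like_characters
-- ===== SOURCE A (Python) =====
-- def replace_digit_like_characters(text):
--     """
--     Replaces letters which look like digits with the digits they look like.
--
--     For example, the characters "o" and "O" are replaced with "0".
--
--     >>> DigitCleaner.replace_digit_like_characters("7l z")
--     '71 2'
--
--     :param text: Text to replace digit-like characters with digits.
--     :type text: str
--     :return: text with digit-like characters replaced
--     :rtype: str
--     """
--     replacements = {
--         "o": "0",
--         "i": "1",
--         "j": "1",
--         "l": "1",
--         "z": "2",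
--         "t": "7"
--     }
--
--     for target, replacement in replacements.items():
--         text = text.replace(target, replacement)
--         text = text.replace(target.upper(), replacement)
--
--     return text
-- ===== SOURCE B (Python) =====
-- def replace_digit_like_characters(text):
--     mapping = {
--         "o": "0", "O": "0",
--         "i": "1", "I": "1",
--         "j": "1", "J": "1",
--         "l": "1", "L": "1",
--         "z": "2", "Z": "2",
--         "t": "7", "T": "7",
--     }
--     return "".join(mapping.get(c, c) for c in text)
-- ===== Notes on version B (the rewrite author's own statement) =====
-- stated objective: idiomatic
-- what changed: B replaces A's twelve full-string str.replace rescans with a single pass over the characters using one lookup table covering both cases, joining the mapped characters once.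
import Mathlib
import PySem

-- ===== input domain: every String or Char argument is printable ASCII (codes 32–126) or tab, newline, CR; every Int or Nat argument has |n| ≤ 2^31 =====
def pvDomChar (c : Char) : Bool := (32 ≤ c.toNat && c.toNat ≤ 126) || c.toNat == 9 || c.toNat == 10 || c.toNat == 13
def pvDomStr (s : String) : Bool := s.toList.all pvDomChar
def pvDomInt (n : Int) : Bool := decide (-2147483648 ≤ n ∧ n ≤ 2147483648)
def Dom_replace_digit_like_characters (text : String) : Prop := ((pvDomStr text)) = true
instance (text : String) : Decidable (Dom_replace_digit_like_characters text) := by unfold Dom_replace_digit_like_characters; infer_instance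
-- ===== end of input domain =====

-- B replaces A's twelve full-string replace passes with a single character-by-character pass over one lookup table (idiomatic; same asymptotic cost).


-- ===== PORT A =====
-- A: for each (target, replacement) dict item, replace target and then target.upper() in the whole string.
def replace_digit_like_characters (text : String) : String :=
  [("o", "0"), ("i", "1"), ("j", "1"), ("l", "1"), ("z", "2"), ("t", "7")].foldl
    (fun t p =>
      PySem.Str.replace (PySem.Str.replace t p.1 p.2) (PySem.Str.upper p.1) p.2)
    text

-- ===== PORT B =====
-- B: one lookup table covering both cases, one pass over the characters, joined once.
def pvMappingB : PySem.Dict Char Char :=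
  PySem.Dict.mk
  [('o', '0'), ('O', '0'), ('i', '1'), ('I', '1'), ('j', '1'), ('J', '1'),
   ('l', '1'), ('L', '1'), ('z', '2'), ('Z', '2'), ('t', '7'), ('T', '7')]

def replace_digit_like_characters_alt (text : String) : String :=
  String.ofList (text.toList.map (fun c => PySem.Dict.getD pvMappingB c c))

-- ===== PRECONDITION & SPEC =====
def Spec_replace_digit_like_characters (text : String) (out : String) : Prop := out = replace_digit_like_characters_alt text
instance (text : String) (out : String) : Decidable (Spec_replace_digit_like_characters text out) := by unfold Spec_replace_digit_like_characters; infer_instance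

-- ===== CLAIM (what is proved, stated in full; the proofs are below) =====
def Claim_equal_replace_digit_like_characters : Prop := ∀ (text : String), Dom_replace_digit_like_characters text → Spec_replace_digit_like_characters text (replace_digit_like_characters text)

-- ===== LEMMAS AND PROOFS =====

-- Replacing a single character by a single character is a pointwise map.
theorem go_single (a b : Char) : ∀ (fuel : Nat) (l acc : List Char), l.length ≤ fuel →
    PySem.Chars.replace.go [a] [b] fuel l acc =
      acc.reverse ++ l.map (fun c => if c = a then b else c) := by
  intro fuel
  induction fuel with
  | zero =>
    intro l acc h
    cases l with
    | nil => simp [PySem.Chars.replace.go]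
    | cons c t => simp at h
  | succ n ih =>
    intro l acc h
    cases l with
    | nil => simp [PySem.Chars.replace.go]
    | cons c t =>
      simp only [PySem.Chars.replace.go]
      by_cases hc : c = a
      · subst hc
        rw [if_pos (by simp [List.isPrefixOf])]
        rw [show List.drop [c].length (c :: t) = t from rfl]
        rw [ih t _ (by simpa using Nat.le_of_succ_le_succ h)]
        simp
      · rw [if_neg (by simp [List.isPrefixOf]; intro he; exact hc he.symm)]
        rw [ih t _ (by simpa using Nat.le_of_succ_le_succ h)]
        simp [hc]

theorem replace_single (a b : Char) (s : List Char) :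
    PySem.Chars.replace s [a] [b] = s.map (fun c => if c = a then b else c) := by
  rw [PySem.Chars.replace]
  simp only [List.isEmpty_cons, if_false, Bool.false_eq_true]
  exact go_single a b s.length s [] (le_refl _)

theorem str_replace_single (a b : Char) (s : String) :
    (PySem.Str.replace s (String.ofList [a]) (String.ofList [b])).toList = s.toList.map (fun c => if c = a then b else c) := by
  rw [PySem.Str.toList_replace]
  simp only [String.toList_ofList]
  rw [replace_single]

-- Named per-character passes (proof helpers; beta-stable under rw).
def pvF1 (c : Char) : Char := if c = 'o' then '0' else c
def pvF2 (c : Char) : Char := if c = 'O' then '0' else c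
def pvF3 (c : Char) : Char := if c = 'i' then '1' else c
def pvF4 (c : Char) : Char := if c = 'I' then '1' else c
def pvF5 (c : Char) : Char := if c = 'j' then '1' else c
def pvF6 (c : Char) : Char := if c = 'J' then '1' else c
def pvF7 (c : Char) : Char := if c = 'l' then '1' else c
def pvF8 (c : Char) : Char := if c = 'L' then '1' else c
def pvF9 (c : Char) : Char := if c = 'z' then '2' else c
def pvF10 (c : Char) : Char := if c = 'Z' then '2' else c
def pvF11 (c : Char) : Char := if c = 't' then '7' else c
def pvF12 (c : Char) : Char := if c = 'T' then '7' else c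

-- A's twelve chained per-character passes equal B's table lookup, character by character.
theorem char_fun_eq (c : Char) :
    pvF12 (pvF11 (pvF10 (pvF9 (pvF8 (pvF7 (pvF6 (pvF5 (pvF4 (pvF3 (pvF2 (pvF1 c)))))))))))
      = PySem.Dict.getD pvMappingB c c := by
  by_cases h1 : c = 'o'; · subst h1; rfl
  by_cases h2 : c = 'O'; · subst h2; rfl
  by_cases h3 : c = 'i'; · subst h3; rfl
  by_cases h4 : c = 'I'; · subst h4; rfl
  by_cases h5 : c = 'j'; · subst h5; rfl
  by_cases h6 : c = 'J'; · subst h6; rfl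
  by_cases h7 : c = 'l'; · subst h7; rfl
  by_cases h8 : c = 'L'; · subst h8; rfl
  by_cases h9 : c = 'z'; · subst h9; rfl
  by_cases h10 : c = 'Z'; · subst h10; rfl
  by_cases h11 : c = 't'; · subst h11; rfl
  by_cases h12 : c = 'T'; · subst h12; rfl
  simp only [pvF1, pvF2, pvF3, pvF4, pvF5, pvF6, pvF7, pvF8, pvF9, pvF10, pvF11, pvF12,
    if_neg h1, if_neg h2, if_neg h3, if_neg h4, if_neg h5, if_neg h6,
    if_neg h7, if_neg h8, if_neg h9, if_neg h10, if_neg h11, if_neg h12]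
  have hf : List.find? (fun p => p.1 == c) pvMappingB.items = none := by
    rw [List.find?_eq_none]
    intro p hp
    simp only [pvMappingB, List.mem_cons, List.not_mem_nil, or_false] at hp
    rcases hp with rfl|rfl|rfl|rfl|rfl|rfl|rfl|rfl|rfl|rfl|rfl|rfl <;>
      (intro he; simp only [beq_iff_eq] at he;
       first
        | exact h1 he.symm | exact h2 he.symm | exact h3 he.symm | exact h4 he.symm
        | exact h5 he.symm | exact h6 he.symm | exact h7 he.symm | exact h8 he.symm
        | exact h9 he.symm | exact h10 he.symm | exact h11 he.symm | exact h12 he.symm)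
  rw [PySem.Dict.getD, PySem.Dict.get?, hf]
  rfl

-- The twelve successive map passes equal the single lookup pass, by induction on the characters.
theorem maps_eq (l : List Char) :
    List.map pvF12 (List.map pvF11 (List.map pvF10 (List.map pvF9 (List.map pvF8 (List.map pvF7
    (List.map pvF6 (List.map pvF5 (List.map pvF4 (List.map pvF3 (List.map pvF2 (List.map pvF1 l)))))))))))
      = List.map (fun c => PySem.Dict.getD pvMappingB c c) l := by
  induction l with
  | nil => rfl
  | cons c t ih =>
    simp only [List.map_cons]
    rw [ih, char_fun_eq c]


theorem replace_digit_like_characters_spec : Claim_equal_replace_digit_like_characters := by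
  intro text _
  unfold Spec_replace_digit_like_characters replace_digit_like_characters replace_digit_like_characters_alt
  simp only [List.foldl_cons, List.foldl_nil]
  apply String.toList_inj.mp
  rw [show ("o" : String) = String.ofList ['o'] from rfl,
      show ("i" : String) = String.ofList ['i'] from rfl,
      show ("j" : String) = String.ofList ['j'] from rfl,
      show ("l" : String) = String.ofList ['l'] from rfl,
      show ("z" : String) = String.ofList ['z'] from rfl,
      show ("t" : String) = String.ofList ['t'] from rfl,
      show ("0" : String) = String.ofList ['0'] from rfl,
      show ("1" : String) = String.ofList ['1'] from rfl,
      show ("2" : String) = String.ofList ['2'] from rfl,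
      show ("7" : String) = String.ofList ['7'] from rfl]
  rw [show PySem.Str.upper (String.ofList ['o']) = String.ofList ['O'] from rfl,
      show PySem.Str.upper (String.ofList ['i']) = String.ofList ['I'] from rfl,
      show PySem.Str.upper (String.ofList ['j']) = String.ofList ['J'] from rfl,
      show PySem.Str.upper (String.ofList ['l']) = String.ofList ['L'] from rfl,
      show PySem.Str.upper (String.ofList ['z']) = String.ofList ['Z'] from rfl,
      show PySem.Str.upper (String.ofList ['t']) = String.ofList ['T'] from rfl]
  simp only [str_replace_single, String.toList_ofList]
  rw [show (fun c => if c = 'o' then '0' else c) = pvF1 from rfl,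
      show (fun c => if c = 'O' then '0' else c) = pvF2 from rfl,
      show (fun c => if c = 'i' then '1' else c) = pvF3 from rfl,
      show (fun c => if c = 'I' then '1' else c) = pvF4 from rfl,
      show (fun c => if c = 'j' then '1' else c) = pvF5 from rfl,
      show (fun c => if c = 'J' then '1' else c) = pvF6 from rfl,
      show (fun c => if c = 'l' then '1' else c) = pvF7 from rfl,
      show (fun c => if c = 'L' then '1' else c) = pvF8 from rfl,
      show (fun c => if c = 'z' then '2' else c) = pvF9 from rfl,
      show (fun c => if c = 'Z' then '2' else c) = pvF10 from rfl,
      show (fun c => if c = 't' then '7' else c) = pvF11 from rfl,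
      show (fun c => if c = 'T' then '7' else c) = pvF12 from rfl]
  exact maps_eq text.toList
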